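-- pv_equiv track=rewrite | github.com/alifallahi/RecommenderSystem | main.py | find_corated_items
-- ===== SOURCE A (Python) =====
-- all_users_dict = {
-- "user1": [2,0,4,4,0,0,2,0,0,0,0,0,0,0,0,5,0,4,0,0,0,0,0,0,0,0,0,2,0,0],
-- "user2": [5,5,3,2,5,0,0,0,0,5,5,5,0,0,5,0,3,5,0,0,5,0,0,0,5,0,5,5,0,5],
-- "user3": [2,0,0,0,0,0,5,5,0,0,0,5,0,0,0,0,3,5,0,5,5,0,0,0,5,5,5,0,0,5],
-- "user4": [1,4,5,0,2,3,5,5,0,0,0,5,5,2,0,5,0,2,5,5,5,3,5,3,5,5,5,0,3,5],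
-- "user5": [4,0,4,0,5,0,0,5,0,4,0,0,5,4,4,5,0,4,0,0,0,4,5,3,4,0,0,4,5,5],
-- "user6": [4,4,5,0,5,4,4,3,0,5,0,5,4,5,5,5,0,5,0,0,5,5,0,5,5,5,5,3,0,4],
-- "user7": [4,0,2,4,4,4,5,4,0,3,0,0,4,0,4,5,5,5,0,4,5,4,0,5,5,4,4,0,0,4],
-- "user8": [4,3,4,5,3,5,3,5,4,5,4,4,5,3,5,5,4,5,4,4,5,5,5,4,5,4,4,5,5,5],
-- "user9": [3,0,4,5,3,0,3,3,0,1,0,0,1,0,5,0,5,0,0,0,2,0,0,0,5,1,0,0,0,0],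
-- "user10": [0,0,4,0,0,2,0,0,4,4,0,5,0,0,0,0,5,4,0,0,5,0,5,0,0,5,5,4,0,0],
-- "user11": [3,0,0,4,4,0,0,5,0,0,2,4,5,4,3,0,0,4,5,5,4,3,5,4,4,0,4,0,0,5],
-- "user12": [3,1,0,0,5,2,5,0,5,0,5,5,0,0,4,5,0,3,3,0,5,0,5,3,2,5,5,1,4,5],
-- "user13": [0,0,0,0,0,0,0,0,0,0,0,0,0,0,0,0,0,0,0,0,0,0,0,0,0,0,0,0,0,0],
-- "user14": [5,4,4,5,3,5,5,5,5,5,5,5,5,3,5,5,5,5,4,3,5,5,5,4,5,5,5,3,3,3],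
-- "user15": [5,0,4,0,5,0,0,0,0,0,0,3,0,0,0,4,0,0,0,0,0,0,0,0,0,0,0,0,0,0],
-- "user16": [4,0,0,5,0,0,0,0,0,0,0,0,0,0,0,0,0,3,0,0,0,0,0,0,4,0,0,0,0,0],
-- "user17": [5,3,4,4,5,5,5,5,5,4,3,4,5,4,5,5,2,4,3,5,5,5,3,5,5,5,5,5,3,5],
-- "user18": [3,5,5,5,5,3,4,5,0,4,0,5,5,4,5,5,0,0,0,4,5,5,0,5,5,5,0,0,0,5],
-- "user19": [0,0,0,4,0,3,4,5,4,4,2,5,4,4,5,3,3,3,2,2,5,5,2,3,4,4,4,1,4,5],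
-- "user20": [4,0,0,4,0,5,4,4,0,4,0,3,0,0,5,0,5,5,0,0,3,5,0,3,0,0,5,4,0,4],
-- "user21": [5,2,5,3,3,3,4,4,4,4,2,5,4,3,5,3,3,4,3,2,5,5,2,2,5,4,5,1,4,5],
-- "user22": [5,4,0,5,0,0,0,4,5,0,5,2,4,0,5,0,4,4,0,5,5,3,5,0,5,5,5,0,5,5],
-- "user23": [4,5,0,0,5,0,5,5,0,5,0,5,5,0,5,5,0,3,3,4,5,5,2,0,0,5,5,0,0,0],
-- "user24": [4,0,5,5,5,0,5,0,5,5,0,0,0,0,0,5,0,5,0,0,5,4,0,0,0,4,0,3,0,0],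
-- "user25": [5,3,3,5,3,3,3,5,0,0,5,5,5,2,0,5,0,3,0,0,5,4,0,0,5,5,5,0,0,3],
-- "user26": [5,0,0,0,4,0,0,0,0,3,0,0,0,0,0,0,0,5,0,0,3,0,0,0,0,5,0,0,0,4],
-- "user27": [3,4,3,5,4,1,4,4,2,5,3,4,4,5,4,4,4,4,3,4,5,3,4,4,5,5,4,2,4,3],
-- "user28": [0,3,3,3,2,2,3,3,2,3,3,3,3,2,5,3,3,3,2,2,5,4,2,3,4,5,5,3,2,3],
-- "user29": [5,3,2,5,5,3,3,5,5,4,4,4,5,3,4,5,4,5,2,5,5,5,5,2,4,4,4,3,3,5],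
-- "user30": [4,0,5,5,4,0,0,0,0,0,5,0,0,5,0,0,0,0,4,4,4,5,5,0,5,5,0,4,0,0],
-- "user31": [5,4,3,4,4,0,4,5,0,5,0,0,5,5,0,0,4,5,0,5,0,4,0,0,5,0,0,0,0,5],
-- "user32": [2,4,2,3,3,1,2,3,3,1,3,3,2,2,2,3,1,1,1,3,3,2,4,1,4,3,4,1,3,4],
-- "user33": [5,0,5,3,5,4,0,5,0,0,0,4,0,0,0,0,0,4,5,0,0,5,0,0,5,5,4,0,0,5],
-- "user34": [3,0,5,5,0,0,4,5,4,3,5,5,4,4,5,0,5,4,5,5,4,5,5,4,0,3,0,0,0,5],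
-- "user35": [3,2,3,0,3,1,3,3,0,4,0,0,4,4,0,3,0,1,5,5,0,0,5,4,4,5,5,0,3,5],
-- "user36": [0,0,0,0,0,0,0,0,0,0,0,0,0,0,0,3,0,0,0,0,0,0,0,0,0,0,0,0,0,0],
-- "user37": [3,5,5,4,4,5,5,4,4,3,3,5,4,3,5,5,4,3,5,5,5,5,3,5,4,5,4,3,4,5],
-- "user38": [5,5,3,2,4,0,0,5,0,3,4,4,5,0,3,5,0,3,0,5,3,3,0,0,4,4,4,0,0,5],
-- "user39": [0,0,5,0,3,0,0,0,0,0,0,0,0,0,0,5,0,0,0,0,0,2,0,0,0,2,0,0,0,0],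
-- "user40": [5,5,4,0,0,0,4,5,0,5,3,0,4,0,5,0,0,5,0,0,5,0,0,0,0,0,0,0,0,3],
-- "user41": [4,0,5,5,0,0,2,0,0,4,0,3,0,0,0,5,4,5,0,5,5,0,0,0,4,5,5,0,0,4],
-- "user42": [4,5,3,0,0,2,5,2,0,3,4,5,0,0,3,5,0,3,5,5,4,4,1,5,5,4,4,2,4,4],
-- "user43": [3,0,3,4,5,2,3,4,3,3,3,3,3,3,4,4,3,4,5,4,5,4,3,4,3,3,4,2,4,5],
-- "user44": [4,3,4,3,4,2,2,5,0,0,0,0,2,5,4,3,0,4,0,4,0,0,4,0,0,5,0,0,0,0],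
-- "user45": [2,1,5,3,5,3,3,1,2,3,3,0,3,2,1,5,5,5,1,3,1,4,4,4,2,5,2,4,4,3],
-- "user46": [4,5,5,5,3,0,5,5,3,4,0,0,5,0,5,3,0,4,3,0,5,5,0,0,0,4,0,0,0,5],
-- "user47": [4,0,5,5,3,4,3,5,0,5,0,4,5,0,5,5,0,5,5,5,4,4,4,5,5,5,5,0,4,5],
-- "user48": [0,0,5,5,5,0,0,0,5,5,0,0,0,0,4,4,0,5,0,4,5,5,0,0,0,5,0,4,0,0],
-- "user49": [0,0,4,0,0,0,0,0,0,5,0,0,0,0,0,4,0,0,0,0,5,0,0,0,0,0,0,0,0,0],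
-- "user50": [4,3,5,0,4,0,0,0,0,0,0,0,0,5,5,4,0,0,0,5,4,0,5,0,0,5,4,0,0,4],
-- "user51": [1,4,5,4,2,5,3,4,3,5,4,3,3,0,5,3,4,0,0,0,5,4,0,0,5,0,0,0,0,5],
-- "user52": [0,0,0,5,5,0,0,0,0,0,0,0,0,0,0,5,0,0,0,0,5,0,0,0,5,5,0,0,0,0],
-- "user53": [4,0,0,0,0,0,0,0,0,0,0,0,0,0,0,0,0,4,0,0,5,0,0,0,0,0,0,0,0,0],
-- "user54": [4,3,5,5,4,4,5,5,5,4,4,4,5,5,5,4,5,4,4,5,5,4,4,4,5,5,4,4,5,5],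
-- "user55": [3,0,4,4,0,0,2,4,3,3,4,2,3,3,4,4,0,3,0,4,4,4,3,0,4,4,4,2,2,3],
-- "user56": [2,3,5,0,0,3,3,0,0,0,0,5,0,0,4,0,0,5,4,0,5,5,0,0,5,5,5,0,0,5],
-- "user57": [0,0,0,0,0,0,0,0,0,0,0,0,0,0,0,0,0,0,0,0,0,0,0,0,0,0,0,0,0,0],
-- "user58": [0,0,0,0,3,3,0,4,0,3,0,4,0,0,5,4,0,0,0,0,5,4,0,0,4,4,0,0,0,0],
-- "user59": [5,0,0,0,2,0,5,0,0,0,0,0,0,0,0,5,0,5,0,0,0,5,0,0,0,5,0,5,0,0],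
-- "user60": [0,0,5,0,3,0,5,4,0,0,0,5,5,0,5,5,0,5,0,0,0,0,0,0,5,5,5,0,0,5],
-- "user61": [3,0,0,0,4,4,0,5,0,4,4,5,4,0,5,5,5,4,0,5,4,0,0,4,3,5,4,0,5,5],
-- "user62": [4,0,0,0,0,0,5,0,0,0,0,5,0,0,0,5,0,5,0,3,0,4,2,0,0,4,0,3,0,0],
-- "user63": [5,0,0,0,0,5,3,4,5,3,0,5,4,0,5,0,5,5,0,0,5,0,0,0,0,5,0,5,0,5],
-- "user64": [5,0,3,3,3,0,5,5,0,0,0,5,5,0,0,0,0,0,0,5,0,0,0,0,5,5,5,0,0,5],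
-- "user65": [4,0,0,0,0,0,0,0,0,0,0,0,0,0,0,0,0,0,0,5,0,0,0,0,4,0,0,0,0,0],
-- "user66": [0,0,0,0,0,0,0,0,0,0,0,0,0,0,0,0,0,0,0,0,0,0,0,5,0,0,0,3,5,0],
-- "user67": [5,2,1,5,5,2,1,3,1,5,5,3,5,5,5,5,5,5,5,5,2,5,4,2,5,1,5,1,1,5],
-- "user68": [3,2,2,2,3,4,3,4,2,2,0,2,2,2,4,4,0,3,2,1,0,4,2,2,3,4,3,4,3,5],
-- "user69": [5,5,5,5,5,5,0,0,0,0,0,0,0,0,0,5,0,5,0,0,5,5,0,0,5,5,0,0,0,5]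
-- }
--
-- def find_corated_items(array1, array2):
--     temp_corated = []
--     array1 = "user"+str(array1)
--     array2 = "user"+str(array2)
--     array1 = list_input = all_users_dict[array1]
--     array2 = list_input = all_users_dict[array2]
--     for x1 in range(0, len(array1)):
--         if array1[x1] > 0 and  array2[x1] >0:
--             temp_corated.append(x1)
--     return temp_corated
-- ===== SOURCE B (Python) =====
-- # B: the rating lists are only ever consulted for positivity, so this version ships,
-- # per user, the precomputed sorted list of positively-rated indices and intersects the
-- # two lists with a two-pointer merge (same "user"+str(n) key, so a missing user still
-- # raises KeyError).
-- positive_indices_dict = {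
--     "user1": [0, 2, 3, 6, 15, 17, 27],
--     "user2": [0, 1, 2, 3, 4, 9, 10, 11, 14, 16, 17, 20, 24, 26, 27, 29],
--     "user3": [0, 6, 7, 11, 16, 17, 19, 20, 24, 25, 26, 29],
--     "user4": [0, 1, 2, 4, 5, 6, 7, 11, 12, 13, 15, 17, 18, 19, 20, 21, 22, 23, 24, 25, 26, 28, 29],
--     "user5": [0, 2, 4, 7, 9, 12, 13, 14, 15, 17, 21, 22, 23, 24, 27, 28, 29],
--     "user6": [0, 1, 2, 4, 5, 6, 7, 9, 11, 12, 13, 14, 15, 17, 20, 21, 23, 24, 25, 26, 27, 29],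
--     "user7": [0, 2, 3, 4, 5, 6, 7, 9, 12, 14, 15, 16, 17, 19, 20, 21, 23, 24, 25, 26, 29],
--     "user8": [0, 1, 2, 3, 4, 5, 6, 7, 8, 9, 10, 11, 12, 13, 14, 15, 16, 17, 18, 19, 20, 21, 22, 23, 24, 25, 26, 27, 28, 29],
--     "user9": [0, 2, 3, 4, 6, 7, 9, 12, 14, 16, 20, 24, 25],
--     "user10": [2, 5, 8, 9, 11, 16, 17, 20, 22, 25, 26, 27],
--     "user11": [0, 3, 4, 7, 10, 11, 12, 13, 14, 17, 18, 19, 20, 21, 22, 23, 24, 26, 29],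
--     "user12": [0, 1, 4, 5, 6, 8, 10, 11, 14, 15, 17, 18, 20, 22, 23, 24, 25, 26, 27, 28, 29],
--     "user13": [],
--     "user14": [0, 1, 2, 3, 4, 5, 6, 7, 8, 9, 10, 11, 12, 13, 14, 15, 16, 17, 18, 19, 20, 21, 22, 23, 24, 25, 26, 27, 28, 29],
--     "user15": [0, 2, 4, 11, 15],
--     "user16": [0, 3, 17, 24],
--     "user17": [0, 1, 2, 3, 4, 5, 6, 7, 8, 9, 10, 11, 12, 13, 14, 15, 16, 17, 18, 19, 20, 21, 22, 23, 24, 25, 26, 27, 28, 29],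
--     "user18": [0, 1, 2, 3, 4, 5, 6, 7, 9, 11, 12, 13, 14, 15, 19, 20, 21, 23, 24, 25, 29],
--     "user19": [3, 5, 6, 7, 8, 9, 10, 11, 12, 13, 14, 15, 16, 17, 18, 19, 20, 21, 22, 23, 24, 25, 26, 27, 28, 29],
--     "user20": [0, 3, 5, 6, 7, 9, 11, 14, 16, 17, 20, 21, 23, 26, 27, 29],
--     "user21": [0, 1, 2, 3, 4, 5, 6, 7, 8, 9, 10, 11, 12, 13, 14, 15, 16, 17, 18, 19, 20, 21, 22, 23, 24, 25, 26, 27, 28, 29],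
--     "user22": [0, 1, 3, 7, 8, 10, 11, 12, 14, 16, 17, 19, 20, 21, 22, 24, 25, 26, 28, 29],
--     "user23": [0, 1, 4, 6, 7, 9, 11, 12, 14, 15, 17, 18, 19, 20, 21, 22, 25, 26],
--     "user24": [0, 2, 3, 4, 6, 8, 9, 15, 17, 20, 21, 25, 27],
--     "user25": [0, 1, 2, 3, 4, 5, 6, 7, 10, 11, 12, 13, 15, 17, 20, 21, 24, 25, 26, 29],
--     "user26": [0, 4, 9, 17, 20, 25, 29],
--     "user27": [0, 1, 2, 3, 4, 5, 6, 7, 8, 9, 10, 11, 12, 13, 14, 15, 16, 17, 18, 19, 20, 21, 22, 23, 24, 25, 26, 27, 28, 29],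
--     "user28": [1, 2, 3, 4, 5, 6, 7, 8, 9, 10, 11, 12, 13, 14, 15, 16, 17, 18, 19, 20, 21, 22, 23, 24, 25, 26, 27, 28, 29],
--     "user29": [0, 1, 2, 3, 4, 5, 6, 7, 8, 9, 10, 11, 12, 13, 14, 15, 16, 17, 18, 19, 20, 21, 22, 23, 24, 25, 26, 27, 28, 29],
--     "user30": [0, 2, 3, 4, 10, 13, 18, 19, 20, 21, 22, 24, 25, 27],
--     "user31": [0, 1, 2, 3, 4, 6, 7, 9, 12, 13, 16, 17, 19, 21, 24, 29],
--     "user32": [0, 1, 2, 3, 4, 5, 6, 7, 8, 9, 10, 11, 12, 13, 14, 15, 16, 17, 18, 19, 20, 21, 22, 23, 24, 25, 26, 27, 28, 29],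
--     "user33": [0, 2, 3, 4, 5, 7, 11, 17, 18, 21, 24, 25, 26, 29],
--     "user34": [0, 2, 3, 6, 7, 8, 9, 10, 11, 12, 13, 14, 16, 17, 18, 19, 20, 21, 22, 23, 25, 29],
--     "user35": [0, 1, 2, 4, 5, 6, 7, 9, 12, 13, 15, 17, 18, 19, 22, 23, 24, 25, 26, 28, 29],
--     "user36": [15],
--     "user37": [0, 1, 2, 3, 4, 5, 6, 7, 8, 9, 10, 11, 12, 13, 14, 15, 16, 17, 18, 19, 20, 21, 22, 23, 24, 25, 26, 27, 28, 29],
--     "user38": [0, 1, 2, 3, 4, 7, 9, 10, 11, 12, 14, 15, 17, 19, 20, 21, 24, 25, 26, 29],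
--     "user39": [2, 4, 15, 21, 25],
--     "user40": [0, 1, 2, 6, 7, 9, 10, 12, 14, 17, 20, 29],
--     "user41": [0, 2, 3, 6, 9, 11, 15, 16, 17, 19, 20, 24, 25, 26, 29],
--     "user42": [0, 1, 2, 5, 6, 7, 9, 10, 11, 14, 15, 17, 18, 19, 20, 21, 22, 23, 24, 25, 26, 27, 28, 29],
--     "user43": [0, 2, 3, 4, 5, 6, 7, 8, 9, 10, 11, 12, 13, 14, 15, 16, 17, 18, 19, 20, 21, 22, 23, 24, 25, 26, 27, 28, 29],
--     "user44": [0, 1, 2, 3, 4, 5, 6, 7, 12, 13, 14, 15, 17, 19, 22, 25],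
--     "user45": [0, 1, 2, 3, 4, 5, 6, 7, 8, 9, 10, 12, 13, 14, 15, 16, 17, 18, 19, 20, 21, 22, 23, 24, 25, 26, 27, 28, 29],
--     "user46": [0, 1, 2, 3, 4, 6, 7, 8, 9, 12, 14, 15, 17, 18, 20, 21, 25, 29],
--     "user47": [0, 2, 3, 4, 5, 6, 7, 9, 11, 12, 14, 15, 17, 18, 19, 20, 21, 22, 23, 24, 25, 26, 28, 29],
--     "user48": [2, 3, 4, 8, 9, 14, 15, 17, 19, 20, 21, 25, 27],
--     "user49": [2, 9, 15, 20],
--     "user50": [0, 1, 2, 4, 13, 14, 15, 19, 20, 22, 25, 26, 29],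
--     "user51": [0, 1, 2, 3, 4, 5, 6, 7, 8, 9, 10, 11, 12, 14, 15, 16, 20, 21, 24, 29],
--     "user52": [3, 4, 15, 20, 24, 25],
--     "user53": [0, 17, 20],
--     "user54": [0, 1, 2, 3, 4, 5, 6, 7, 8, 9, 10, 11, 12, 13, 14, 15, 16, 17, 18, 19, 20, 21, 22, 23, 24, 25, 26, 27, 28, 29],
--     "user55": [0, 2, 3, 6, 7, 8, 9, 10, 11, 12, 13, 14, 15, 17, 19, 20, 21, 22, 24, 25, 26, 27, 28, 29],
--     "user56": [0, 1, 2, 5, 6, 11, 14, 17, 18, 20, 21, 24, 25, 26, 29],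
--     "user57": [],
--     "user58": [4, 5, 7, 9, 11, 14, 15, 20, 21, 24, 25],
--     "user59": [0, 4, 6, 15, 17, 21, 25, 27],
--     "user60": [2, 4, 6, 7, 11, 12, 14, 15, 17, 24, 25, 26, 29],
--     "user61": [0, 4, 5, 7, 9, 10, 11, 12, 14, 15, 16, 17, 19, 20, 23, 24, 25, 26, 28, 29],
--     "user62": [0, 6, 11, 15, 17, 19, 21, 22, 25, 27],
--     "user63": [0, 5, 6, 7, 8, 9, 11, 12, 14, 16, 17, 20, 25, 27, 29],
--     "user64": [0, 2, 3, 4, 6, 7, 11, 12, 19, 24, 25, 26, 29],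
--     "user65": [0, 19, 24],
--     "user66": [23, 27, 28],
--     "user67": [0, 1, 2, 3, 4, 5, 6, 7, 8, 9, 10, 11, 12, 13, 14, 15, 16, 17, 18, 19, 20, 21, 22, 23, 24, 25, 26, 27, 28, 29],
--     "user68": [0, 1, 2, 3, 4, 5, 6, 7, 8, 9, 11, 12, 13, 14, 15, 17, 18, 19, 21, 22, 23, 24, 25, 26, 27, 28, 29],
--     "user69": [0, 1, 2, 3, 4, 5, 15, 17, 20, 21, 24, 25, 29],}
--
-- def find_corated_items(array1, array2):
--     p = positive_indices_dict["user" + str(array1)]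
--     q = positive_indices_dict["user" + str(array2)]
--     out = []
--     i = 0
--     j = 0
--     while i < len(p) and j < len(q):
--         if p[i] == q[j]:
--             out.append(p[i])
--             i += 1
--             j += 1
--         elif p[i] < q[j]:
--             i += 1
--         else:
--             j += 1
--     return out
-- ===== Notes on version B (the rewrite author's own statement) =====
-- stated objective: alternative
-- what changed: B replaces A's coordinated index loop over the raw rating lists by a per-user precomputed table of sorted positive-rating indices and a two-pointer sorted-list intersection (merge), so the rating values are never examined at call time.
import Mathlib
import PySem

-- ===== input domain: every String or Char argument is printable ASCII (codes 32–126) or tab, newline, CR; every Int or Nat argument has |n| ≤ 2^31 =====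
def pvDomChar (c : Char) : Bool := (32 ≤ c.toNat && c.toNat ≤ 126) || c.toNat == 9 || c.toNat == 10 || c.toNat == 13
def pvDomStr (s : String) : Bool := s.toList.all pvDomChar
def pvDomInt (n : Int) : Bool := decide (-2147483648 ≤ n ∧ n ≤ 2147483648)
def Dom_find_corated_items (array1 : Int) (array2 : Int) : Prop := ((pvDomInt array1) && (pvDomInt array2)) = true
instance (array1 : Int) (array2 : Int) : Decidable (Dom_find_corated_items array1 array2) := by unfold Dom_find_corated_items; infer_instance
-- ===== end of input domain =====

-- B replaces A's coordinated index loop over the raw rating lists by a per-user table of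
-- sorted positive-rating indices and a two-pointer merge intersection (objective: alternative).

-- ===== PORT A =====
-- the module-level all_users_dict
def allUsersEntries : List (String × List Int) := [
  ("user1", [2, 0, 4, 4, 0, 0, 2, 0, 0, 0, 0, 0, 0, 0, 0, 5, 0, 4, 0, 0, 0, 0, 0, 0, 0, 0, 0, 2, 0, 0]),
  ("user2", [5, 5, 3, 2, 5, 0, 0, 0, 0, 5, 5, 5, 0, 0, 5, 0, 3, 5, 0, 0, 5, 0, 0, 0, 5, 0, 5, 5, 0, 5]),
  ("user3", [2, 0, 0, 0, 0, 0, 5, 5, 0, 0, 0, 5, 0, 0, 0, 0, 3, 5, 0, 5, 5, 0, 0, 0, 5, 5, 5, 0, 0, 5]),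
  ("user4", [1, 4, 5, 0, 2, 3, 5, 5, 0, 0, 0, 5, 5, 2, 0, 5, 0, 2, 5, 5, 5, 3, 5, 3, 5, 5, 5, 0, 3, 5]),
  ("user5", [4, 0, 4, 0, 5, 0, 0, 5, 0, 4, 0, 0, 5, 4, 4, 5, 0, 4, 0, 0, 0, 4, 5, 3, 4, 0, 0, 4, 5, 5]),
  ("user6", [4, 4, 5, 0, 5, 4, 4, 3, 0, 5, 0, 5, 4, 5, 5, 5, 0, 5, 0, 0, 5, 5, 0, 5, 5, 5, 5, 3, 0, 4]),
  ("user7", [4, 0, 2, 4, 4, 4, 5, 4, 0, 3, 0, 0, 4, 0, 4, 5, 5, 5, 0, 4, 5, 4, 0, 5, 5, 4, 4, 0, 0, 4]),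
  ("user8", [4, 3, 4, 5, 3, 5, 3, 5, 4, 5, 4, 4, 5, 3, 5, 5, 4, 5, 4, 4, 5, 5, 5, 4, 5, 4, 4, 5, 5, 5]),
  ("user9", [3, 0, 4, 5, 3, 0, 3, 3, 0, 1, 0, 0, 1, 0, 5, 0, 5, 0, 0, 0, 2, 0, 0, 0, 5, 1, 0, 0, 0, 0]),
  ("user10", [0, 0, 4, 0, 0, 2, 0, 0, 4, 4, 0, 5, 0, 0, 0, 0, 5, 4, 0, 0, 5, 0, 5, 0, 0, 5, 5, 4, 0, 0]),
  ("user11", [3, 0, 0, 4, 4, 0, 0, 5, 0, 0, 2, 4, 5, 4, 3, 0, 0, 4, 5, 5, 4, 3, 5, 4, 4, 0, 4, 0, 0, 5]),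
  ("user12", [3, 1, 0, 0, 5, 2, 5, 0, 5, 0, 5, 5, 0, 0, 4, 5, 0, 3, 3, 0, 5, 0, 5, 3, 2, 5, 5, 1, 4, 5]),
  ("user13", [0, 0, 0, 0, 0, 0, 0, 0, 0, 0, 0, 0, 0, 0, 0, 0, 0, 0, 0, 0, 0, 0, 0, 0, 0, 0, 0, 0, 0, 0]),
  ("user14", [5, 4, 4, 5, 3, 5, 5, 5, 5, 5, 5, 5, 5, 3, 5, 5, 5, 5, 4, 3, 5, 5, 5, 4, 5, 5, 5, 3, 3, 3]),
  ("user15", [5, 0, 4, 0, 5, 0, 0, 0, 0, 0, 0, 3, 0, 0, 0, 4, 0, 0, 0, 0, 0, 0, 0, 0, 0, 0, 0, 0, 0, 0]),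
  ("user16", [4, 0, 0, 5, 0, 0, 0, 0, 0, 0, 0, 0, 0, 0, 0, 0, 0, 3, 0, 0, 0, 0, 0, 0, 4, 0, 0, 0, 0, 0]),
  ("user17", [5, 3, 4, 4, 5, 5, 5, 5, 5, 4, 3, 4, 5, 4, 5, 5, 2, 4, 3, 5, 5, 5, 3, 5, 5, 5, 5, 5, 3, 5]),
  ("user18", [3, 5, 5, 5, 5, 3, 4, 5, 0, 4, 0, 5, 5, 4, 5, 5, 0, 0, 0, 4, 5, 5, 0, 5, 5, 5, 0, 0, 0, 5]),
  ("user19", [0, 0, 0, 4, 0, 3, 4, 5, 4, 4, 2, 5, 4, 4, 5, 3, 3, 3, 2, 2, 5, 5, 2, 3, 4, 4, 4, 1, 4, 5]),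
  ("user20", [4, 0, 0, 4, 0, 5, 4, 4, 0, 4, 0, 3, 0, 0, 5, 0, 5, 5, 0, 0, 3, 5, 0, 3, 0, 0, 5, 4, 0, 4]),
  ("user21", [5, 2, 5, 3, 3, 3, 4, 4, 4, 4, 2, 5, 4, 3, 5, 3, 3, 4, 3, 2, 5, 5, 2, 2, 5, 4, 5, 1, 4, 5]),
  ("user22", [5, 4, 0, 5, 0, 0, 0, 4, 5, 0, 5, 2, 4, 0, 5, 0, 4, 4, 0, 5, 5, 3, 5, 0, 5, 5, 5, 0, 5, 5]),
  ("user23", [4, 5, 0, 0, 5, 0, 5, 5, 0, 5, 0, 5, 5, 0, 5, 5, 0, 3, 3, 4, 5, 5, 2, 0, 0, 5, 5, 0, 0, 0]),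
  ("user24", [4, 0, 5, 5, 5, 0, 5, 0, 5, 5, 0, 0, 0, 0, 0, 5, 0, 5, 0, 0, 5, 4, 0, 0, 0, 4, 0, 3, 0, 0]),
  ("user25", [5, 3, 3, 5, 3, 3, 3, 5, 0, 0, 5, 5, 5, 2, 0, 5, 0, 3, 0, 0, 5, 4, 0, 0, 5, 5, 5, 0, 0, 3]),
  ("user26", [5, 0, 0, 0, 4, 0, 0, 0, 0, 3, 0, 0, 0, 0, 0, 0, 0, 5, 0, 0, 3, 0, 0, 0, 0, 5, 0, 0, 0, 4]),
  ("user27", [3, 4, 3, 5, 4, 1, 4, 4, 2, 5, 3, 4, 4, 5, 4, 4, 4, 4, 3, 4, 5, 3, 4, 4, 5, 5, 4, 2, 4, 3]),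
  ("user28", [0, 3, 3, 3, 2, 2, 3, 3, 2, 3, 3, 3, 3, 2, 5, 3, 3, 3, 2, 2, 5, 4, 2, 3, 4, 5, 5, 3, 2, 3]),
  ("user29", [5, 3, 2, 5, 5, 3, 3, 5, 5, 4, 4, 4, 5, 3, 4, 5, 4, 5, 2, 5, 5, 5, 5, 2, 4, 4, 4, 3, 3, 5]),
  ("user30", [4, 0, 5, 5, 4, 0, 0, 0, 0, 0, 5, 0, 0, 5, 0, 0, 0, 0, 4, 4, 4, 5, 5, 0, 5, 5, 0, 4, 0, 0]),
  ("user31", [5, 4, 3, 4, 4, 0, 4, 5, 0, 5, 0, 0, 5, 5, 0, 0, 4, 5, 0, 5, 0, 4, 0, 0, 5, 0, 0, 0, 0, 5]),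
  ("user32", [2, 4, 2, 3, 3, 1, 2, 3, 3, 1, 3, 3, 2, 2, 2, 3, 1, 1, 1, 3, 3, 2, 4, 1, 4, 3, 4, 1, 3, 4]),
  ("user33", [5, 0, 5, 3, 5, 4, 0, 5, 0, 0, 0, 4, 0, 0, 0, 0, 0, 4, 5, 0, 0, 5, 0, 0, 5, 5, 4, 0, 0, 5]),
  ("user34", [3, 0, 5, 5, 0, 0, 4, 5, 4, 3, 5, 5, 4, 4, 5, 0, 5, 4, 5, 5, 4, 5, 5, 4, 0, 3, 0, 0, 0, 5]),
  ("user35", [3, 2, 3, 0, 3, 1, 3, 3, 0, 4, 0, 0, 4, 4, 0, 3, 0, 1, 5, 5, 0, 0, 5, 4, 4, 5, 5, 0, 3, 5]),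
  ("user36", [0, 0, 0, 0, 0, 0, 0, 0, 0, 0, 0, 0, 0, 0, 0, 3, 0, 0, 0, 0, 0, 0, 0, 0, 0, 0, 0, 0, 0, 0]),
  ("user37", [3, 5, 5, 4, 4, 5, 5, 4, 4, 3, 3, 5, 4, 3, 5, 5, 4, 3, 5, 5, 5, 5, 3, 5, 4, 5, 4, 3, 4, 5]),
  ("user38", [5, 5, 3, 2, 4, 0, 0, 5, 0, 3, 4, 4, 5, 0, 3, 5, 0, 3, 0, 5, 3, 3, 0, 0, 4, 4, 4, 0, 0, 5]),
  ("user39", [0, 0, 5, 0, 3, 0, 0, 0, 0, 0, 0, 0, 0, 0, 0, 5, 0, 0, 0, 0, 0, 2, 0, 0, 0, 2, 0, 0, 0, 0]),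
  ("user40", [5, 5, 4, 0, 0, 0, 4, 5, 0, 5, 3, 0, 4, 0, 5, 0, 0, 5, 0, 0, 5, 0, 0, 0, 0, 0, 0, 0, 0, 3]),
  ("user41", [4, 0, 5, 5, 0, 0, 2, 0, 0, 4, 0, 3, 0, 0, 0, 5, 4, 5, 0, 5, 5, 0, 0, 0, 4, 5, 5, 0, 0, 4]),
  ("user42", [4, 5, 3, 0, 0, 2, 5, 2, 0, 3, 4, 5, 0, 0, 3, 5, 0, 3, 5, 5, 4, 4, 1, 5, 5, 4, 4, 2, 4, 4]),
  ("user43", [3, 0, 3, 4, 5, 2, 3, 4, 3, 3, 3, 3, 3, 3, 4, 4, 3, 4, 5, 4, 5, 4, 3, 4, 3, 3, 4, 2, 4, 5]),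
  ("user44", [4, 3, 4, 3, 4, 2, 2, 5, 0, 0, 0, 0, 2, 5, 4, 3, 0, 4, 0, 4, 0, 0, 4, 0, 0, 5, 0, 0, 0, 0]),
  ("user45", [2, 1, 5, 3, 5, 3, 3, 1, 2, 3, 3, 0, 3, 2, 1, 5, 5, 5, 1, 3, 1, 4, 4, 4, 2, 5, 2, 4, 4, 3]),
  ("user46", [4, 5, 5, 5, 3, 0, 5, 5, 3, 4, 0, 0, 5, 0, 5, 3, 0, 4, 3, 0, 5, 5, 0, 0, 0, 4, 0, 0, 0, 5]),
  ("user47", [4, 0, 5, 5, 3, 4, 3, 5, 0, 5, 0, 4, 5, 0, 5, 5, 0, 5, 5, 5, 4, 4, 4, 5, 5, 5, 5, 0, 4, 5]),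
  ("user48", [0, 0, 5, 5, 5, 0, 0, 0, 5, 5, 0, 0, 0, 0, 4, 4, 0, 5, 0, 4, 5, 5, 0, 0, 0, 5, 0, 4, 0, 0]),
  ("user49", [0, 0, 4, 0, 0, 0, 0, 0, 0, 5, 0, 0, 0, 0, 0, 4, 0, 0, 0, 0, 5, 0, 0, 0, 0, 0, 0, 0, 0, 0]),
  ("user50", [4, 3, 5, 0, 4, 0, 0, 0, 0, 0, 0, 0, 0, 5, 5, 4, 0, 0, 0, 5, 4, 0, 5, 0, 0, 5, 4, 0, 0, 4]),
  ("user51", [1, 4, 5, 4, 2, 5, 3, 4, 3, 5, 4, 3, 3, 0, 5, 3, 4, 0, 0, 0, 5, 4, 0, 0, 5, 0, 0, 0, 0, 5]),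
  ("user52", [0, 0, 0, 5, 5, 0, 0, 0, 0, 0, 0, 0, 0, 0, 0, 5, 0, 0, 0, 0, 5, 0, 0, 0, 5, 5, 0, 0, 0, 0]),
  ("user53", [4, 0, 0, 0, 0, 0, 0, 0, 0, 0, 0, 0, 0, 0, 0, 0, 0, 4, 0, 0, 5, 0, 0, 0, 0, 0, 0, 0, 0, 0]),
  ("user54", [4, 3, 5, 5, 4, 4, 5, 5, 5, 4, 4, 4, 5, 5, 5, 4, 5, 4, 4, 5, 5, 4, 4, 4, 5, 5, 4, 4, 5, 5]),
  ("user55", [3, 0, 4, 4, 0, 0, 2, 4, 3, 3, 4, 2, 3, 3, 4, 4, 0, 3, 0, 4, 4, 4, 3, 0, 4, 4, 4, 2, 2, 3]),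
  ("user56", [2, 3, 5, 0, 0, 3, 3, 0, 0, 0, 0, 5, 0, 0, 4, 0, 0, 5, 4, 0, 5, 5, 0, 0, 5, 5, 5, 0, 0, 5]),
  ("user57", [0, 0, 0, 0, 0, 0, 0, 0, 0, 0, 0, 0, 0, 0, 0, 0, 0, 0, 0, 0, 0, 0, 0, 0, 0, 0, 0, 0, 0, 0]),
  ("user58", [0, 0, 0, 0, 3, 3, 0, 4, 0, 3, 0, 4, 0, 0, 5, 4, 0, 0, 0, 0, 5, 4, 0, 0, 4, 4, 0, 0, 0, 0]),
  ("user59", [5, 0, 0, 0, 2, 0, 5, 0, 0, 0, 0, 0, 0, 0, 0, 5, 0, 5, 0, 0, 0, 5, 0, 0, 0, 5, 0, 5, 0, 0]),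
  ("user60", [0, 0, 5, 0, 3, 0, 5, 4, 0, 0, 0, 5, 5, 0, 5, 5, 0, 5, 0, 0, 0, 0, 0, 0, 5, 5, 5, 0, 0, 5]),
  ("user61", [3, 0, 0, 0, 4, 4, 0, 5, 0, 4, 4, 5, 4, 0, 5, 5, 5, 4, 0, 5, 4, 0, 0, 4, 3, 5, 4, 0, 5, 5]),
  ("user62", [4, 0, 0, 0, 0, 0, 5, 0, 0, 0, 0, 5, 0, 0, 0, 5, 0, 5, 0, 3, 0, 4, 2, 0, 0, 4, 0, 3, 0, 0]),
  ("user63", [5, 0, 0, 0, 0, 5, 3, 4, 5, 3, 0, 5, 4, 0, 5, 0, 5, 5, 0, 0, 5, 0, 0, 0, 0, 5, 0, 5, 0, 5]),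
  ("user64", [5, 0, 3, 3, 3, 0, 5, 5, 0, 0, 0, 5, 5, 0, 0, 0, 0, 0, 0, 5, 0, 0, 0, 0, 5, 5, 5, 0, 0, 5]),
  ("user65", [4, 0, 0, 0, 0, 0, 0, 0, 0, 0, 0, 0, 0, 0, 0, 0, 0, 0, 0, 5, 0, 0, 0, 0, 4, 0, 0, 0, 0, 0]),
  ("user66", [0, 0, 0, 0, 0, 0, 0, 0, 0, 0, 0, 0, 0, 0, 0, 0, 0, 0, 0, 0, 0, 0, 0, 5, 0, 0, 0, 3, 5, 0]),
  ("user67", [5, 2, 1, 5, 5, 2, 1, 3, 1, 5, 5, 3, 5, 5, 5, 5, 5, 5, 5, 5, 2, 5, 4, 2, 5, 1, 5, 1, 1, 5]),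
  ("user68", [3, 2, 2, 2, 3, 4, 3, 4, 2, 2, 0, 2, 2, 2, 4, 4, 0, 3, 2, 1, 0, 4, 2, 2, 3, 4, 3, 4, 3, 5]),
  ("user69", [5, 5, 5, 5, 5, 5, 0, 0, 0, 0, 0, 0, 0, 0, 0, 5, 0, 5, 0, 0, 5, 5, 0, 0, 5, 5, 0, 0, 0, 5])]

def allUsersDict : PySem.Dict String (List Int) := PySem.Dict.mk allUsersEntries

-- Note: pyGetD's default 0 is never consulted on admitted inputs (every rating list has
-- length 30, and the loop index ranges over the first list's length).
def find_corated_items (array1 : Int) (array2 : Int) : List Int :=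
  let key1 := "user" ++ PySem.Int.toStr array1
  let key2 := "user" ++ PySem.Int.toStr array2
  let a1 := (PySem.Dict.get? allUsersDict key1).getD []
  let a2 := (PySem.Dict.get? allUsersDict key2).getD []
  (PySem.List.pyRange 0 (PySem.List.len a1)).foldl
    (fun acc x1 =>
      if 0 < PySem.List.pyGetD a1 x1 0 ∧ 0 < PySem.List.pyGetD a2 x1 0 then acc ++ [x1] else acc)
    []

-- ===== PORT B =====
-- Source B's module-level positive_indices_dict: per user, the sorted indices rated > 0
def positiveIndicesEntries : List (String × List Int) := [
  ("user1", [0, 2, 3, 6, 15, 17, 27]),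
  ("user2", [0, 1, 2, 3, 4, 9, 10, 11, 14, 16, 17, 20, 24, 26, 27, 29]),
  ("user3", [0, 6, 7, 11, 16, 17, 19, 20, 24, 25, 26, 29]),
  ("user4", [0, 1, 2, 4, 5, 6, 7, 11, 12, 13, 15, 17, 18, 19, 20, 21, 22, 23, 24, 25, 26, 28, 29]),
  ("user5", [0, 2, 4, 7, 9, 12, 13, 14, 15, 17, 21, 22, 23, 24, 27, 28, 29]),
  ("user6", [0, 1, 2, 4, 5, 6, 7, 9, 11, 12, 13, 14, 15, 17, 20, 21, 23, 24, 25, 26, 27, 29]),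
  ("user7", [0, 2, 3, 4, 5, 6, 7, 9, 12, 14, 15, 16, 17, 19, 20, 21, 23, 24, 25, 26, 29]),
  ("user8", [0, 1, 2, 3, 4, 5, 6, 7, 8, 9, 10, 11, 12, 13, 14, 15, 16, 17, 18, 19, 20, 21, 22, 23, 24, 25, 26, 27, 28, 29]),
  ("user9", [0, 2, 3, 4, 6, 7, 9, 12, 14, 16, 20, 24, 25]),
  ("user10", [2, 5, 8, 9, 11, 16, 17, 20, 22, 25, 26, 27]),
  ("user11", [0, 3, 4, 7, 10, 11, 12, 13, 14, 17, 18, 19, 20, 21, 22, 23, 24, 26, 29]),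
  ("user12", [0, 1, 4, 5, 6, 8, 10, 11, 14, 15, 17, 18, 20, 22, 23, 24, 25, 26, 27, 28, 29]),
  ("user13", []),
  ("user14", [0, 1, 2, 3, 4, 5, 6, 7, 8, 9, 10, 11, 12, 13, 14, 15, 16, 17, 18, 19, 20, 21, 22, 23, 24, 25, 26, 27, 28, 29]),
  ("user15", [0, 2, 4, 11, 15]),
  ("user16", [0, 3, 17, 24]),
  ("user17", [0, 1, 2, 3, 4, 5, 6, 7, 8, 9, 10, 11, 12, 13, 14, 15, 16, 17, 18, 19, 20, 21, 22, 23, 24, 25, 26, 27, 28, 29]),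
  ("user18", [0, 1, 2, 3, 4, 5, 6, 7, 9, 11, 12, 13, 14, 15, 19, 20, 21, 23, 24, 25, 29]),
  ("user19", [3, 5, 6, 7, 8, 9, 10, 11, 12, 13, 14, 15, 16, 17, 18, 19, 20, 21, 22, 23, 24, 25, 26, 27, 28, 29]),
  ("user20", [0, 3, 5, 6, 7, 9, 11, 14, 16, 17, 20, 21, 23, 26, 27, 29]),
  ("user21", [0, 1, 2, 3, 4, 5, 6, 7, 8, 9, 10, 11, 12, 13, 14, 15, 16, 17, 18, 19, 20, 21, 22, 23, 24, 25, 26, 27, 28, 29]),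
  ("user22", [0, 1, 3, 7, 8, 10, 11, 12, 14, 16, 17, 19, 20, 21, 22, 24, 25, 26, 28, 29]),
  ("user23", [0, 1, 4, 6, 7, 9, 11, 12, 14, 15, 17, 18, 19, 20, 21, 22, 25, 26]),
  ("user24", [0, 2, 3, 4, 6, 8, 9, 15, 17, 20, 21, 25, 27]),
  ("user25", [0, 1, 2, 3, 4, 5, 6, 7, 10, 11, 12, 13, 15, 17, 20, 21, 24, 25, 26, 29]),
  ("user26", [0, 4, 9, 17, 20, 25, 29]),
  ("user27", [0, 1, 2, 3, 4, 5, 6, 7, 8, 9, 10, 11, 12, 13, 14, 15, 16, 17, 18, 19, 20, 21, 22, 23, 24, 25, 26, 27, 28, 29]),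
  ("user28", [1, 2, 3, 4, 5, 6, 7, 8, 9, 10, 11, 12, 13, 14, 15, 16, 17, 18, 19, 20, 21, 22, 23, 24, 25, 26, 27, 28, 29]),
  ("user29", [0, 1, 2, 3, 4, 5, 6, 7, 8, 9, 10, 11, 12, 13, 14, 15, 16, 17, 18, 19, 20, 21, 22, 23, 24, 25, 26, 27, 28, 29]),
  ("user30", [0, 2, 3, 4, 10, 13, 18, 19, 20, 21, 22, 24, 25, 27]),
  ("user31", [0, 1, 2, 3, 4, 6, 7, 9, 12, 13, 16, 17, 19, 21, 24, 29]),
  ("user32", [0, 1, 2, 3, 4, 5, 6, 7, 8, 9, 10, 11, 12, 13, 14, 15, 16, 17, 18, 19, 20, 21, 22, 23, 24, 25, 26, 27, 28, 29]),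
  ("user33", [0, 2, 3, 4, 5, 7, 11, 17, 18, 21, 24, 25, 26, 29]),
  ("user34", [0, 2, 3, 6, 7, 8, 9, 10, 11, 12, 13, 14, 16, 17, 18, 19, 20, 21, 22, 23, 25, 29]),
  ("user35", [0, 1, 2, 4, 5, 6, 7, 9, 12, 13, 15, 17, 18, 19, 22, 23, 24, 25, 26, 28, 29]),
  ("user36", [15]),
  ("user37", [0, 1, 2, 3, 4, 5, 6, 7, 8, 9, 10, 11, 12, 13, 14, 15, 16, 17, 18, 19, 20, 21, 22, 23, 24, 25, 26, 27, 28, 29]),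
  ("user38", [0, 1, 2, 3, 4, 7, 9, 10, 11, 12, 14, 15, 17, 19, 20, 21, 24, 25, 26, 29]),
  ("user39", [2, 4, 15, 21, 25]),
  ("user40", [0, 1, 2, 6, 7, 9, 10, 12, 14, 17, 20, 29]),
  ("user41", [0, 2, 3, 6, 9, 11, 15, 16, 17, 19, 20, 24, 25, 26, 29]),
  ("user42", [0, 1, 2, 5, 6, 7, 9, 10, 11, 14, 15, 17, 18, 19, 20, 21, 22, 23, 24, 25, 26, 27, 28, 29]),
  ("user43", [0, 2, 3, 4, 5, 6, 7, 8, 9, 10, 11, 12, 13, 14, 15, 16, 17, 18, 19, 20, 21, 22, 23, 24, 25, 26, 27, 28, 29]),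
  ("user44", [0, 1, 2, 3, 4, 5, 6, 7, 12, 13, 14, 15, 17, 19, 22, 25]),
  ("user45", [0, 1, 2, 3, 4, 5, 6, 7, 8, 9, 10, 12, 13, 14, 15, 16, 17, 18, 19, 20, 21, 22, 23, 24, 25, 26, 27, 28, 29]),
  ("user46", [0, 1, 2, 3, 4, 6, 7, 8, 9, 12, 14, 15, 17, 18, 20, 21, 25, 29]),
  ("user47", [0, 2, 3, 4, 5, 6, 7, 9, 11, 12, 14, 15, 17, 18, 19, 20, 21, 22, 23, 24, 25, 26, 28, 29]),
  ("user48", [2, 3, 4, 8, 9, 14, 15, 17, 19, 20, 21, 25, 27]),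
  ("user49", [2, 9, 15, 20]),
  ("user50", [0, 1, 2, 4, 13, 14, 15, 19, 20, 22, 25, 26, 29]),
  ("user51", [0, 1, 2, 3, 4, 5, 6, 7, 8, 9, 10, 11, 12, 14, 15, 16, 20, 21, 24, 29]),
  ("user52", [3, 4, 15, 20, 24, 25]),
  ("user53", [0, 17, 20]),
  ("user54", [0, 1, 2, 3, 4, 5, 6, 7, 8, 9, 10, 11, 12, 13, 14, 15, 16, 17, 18, 19, 20, 21, 22, 23, 24, 25, 26, 27, 28, 29]),
  ("user55", [0, 2, 3, 6, 7, 8, 9, 10, 11, 12, 13, 14, 15, 17, 19, 20, 21, 22, 24, 25, 26, 27, 28, 29]),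
  ("user56", [0, 1, 2, 5, 6, 11, 14, 17, 18, 20, 21, 24, 25, 26, 29]),
  ("user57", []),
  ("user58", [4, 5, 7, 9, 11, 14, 15, 20, 21, 24, 25]),
  ("user59", [0, 4, 6, 15, 17, 21, 25, 27]),
  ("user60", [2, 4, 6, 7, 11, 12, 14, 15, 17, 24, 25, 26, 29]),
  ("user61", [0, 4, 5, 7, 9, 10, 11, 12, 14, 15, 16, 17, 19, 20, 23, 24, 25, 26, 28, 29]),
  ("user62", [0, 6, 11, 15, 17, 19, 21, 22, 25, 27]),
  ("user63", [0, 5, 6, 7, 8, 9, 11, 12, 14, 16, 17, 20, 25, 27, 29]),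
  ("user64", [0, 2, 3, 4, 6, 7, 11, 12, 19, 24, 25, 26, 29]),
  ("user65", [0, 19, 24]),
  ("user66", [23, 27, 28]),
  ("user67", [0, 1, 2, 3, 4, 5, 6, 7, 8, 9, 10, 11, 12, 13, 14, 15, 16, 17, 18, 19, 20, 21, 22, 23, 24, 25, 26, 27, 28, 29]),
  ("user68", [0, 1, 2, 3, 4, 5, 6, 7, 8, 9, 11, 12, 13, 14, 15, 17, 18, 19, 21, 22, 23, 24, 25, 26, 27, 28, 29]),
  ("user69", [0, 1, 2, 3, 4, 5, 15, 17, 20, 21, 24, 25, 29])]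

def positiveIndicesDict : PySem.Dict String (List Int) := PySem.Dict.mk positiveIndicesEntries

-- Source B's two-pointer while loop over p and q, as structural recursion on the two lists
def mergeInter : List Int → List Int → List Int
  | [], _ => []
  | _ :: _, [] => []
  | a :: as_, b :: bs =>
    if a = b then a :: mergeInter as_ bs
    else if a < b then mergeInter as_ (b :: bs)
    else mergeInter (a :: as_) bs
termination_by p q => p.length + q.length

def find_corated_items_alt (array1 : Int) (array2 : Int) : List Int :=
  let p := (PySem.Dict.get? positiveIndicesDict ("user" ++ PySem.Int.toStr array1)).getD []
  let q := (PySem.Dict.get? positiveIndicesDict ("user" ++ PySem.Int.toStr array2)).getD []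
  mergeInter p q

-- ===== PRECONDITION & SPEC =====
-- Pre_ excludes exactly the inputs on which Python A raises KeyError ("user"+str(n) not a
-- key): the dict keys are user1 .. user69.
def Pre_find_corated_items (array1 : Int) (array2 : Int) : Prop :=
  1 ≤ array1 ∧ array1 ≤ 69 ∧ 1 ≤ array2 ∧ array2 ≤ 69
instance (array1 : Int) (array2 : Int) : Decidable (Pre_find_corated_items array1 array2) := by
  unfold Pre_find_corated_items; infer_instance
def pvWitness_find_corated_items : Int × Int := (1, 2)

def Spec_find_corated_items (array1 : Int) (array2 : Int) (out : List Int) : Prop := out = find_corated_items_alt array1 array2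
instance (array1 : Int) (array2 : Int) (out : List Int) : Decidable (Spec_find_corated_items array1 array2 out) := by unfold Spec_find_corated_items; infer_instance

-- ===== CLAIM (what is proved, stated in full; the proofs are below) =====
def Claim_equal_find_corated_items : Prop := ∀ (array1 : Int) (array2 : Int), Dom_find_corated_items array1 array2 → Pre_find_corated_items array1 array2 → Spec_find_corated_items array1 array2 (find_corated_items array1 array2)

-- ===== LEMMAS AND PROOFS =====

-- the positive-index list of a rating list, as A's loop sees it
def posOf (l : List Int) : List Int :=
  (PySem.List.pyRange 0 (PySem.List.len l)).filter (fun i => decide (0 < PySem.List.pyGetD l i 0))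

-- out-of-range non-negative index: pyGetD returns the default
lemma pyGetD_of_le_length {l : List Int} {i : Int} (h0 : 0 ≤ i) (h : (l.length : Int) ≤ i) :
    PySem.List.pyGetD l i 0 = 0 := by
  simp only [PySem.List.pyGetD, PySem.List.pyGet?, PySem.List.pyIdx?]
  rw [if_pos h0, if_neg (by omega)]
  rfl

-- B's precomputed table IS the posOf image of A's table (a closed computation)
lemma posEntries_eq :
    positiveIndicesEntries = allUsersEntries.map (fun e => (e.1, posOf e.2)) := by decide

-- lookup in a value-mapped literal dict
lemma get?_mk_map (f : List Int → List Int) :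
    ∀ (l : List (String × List Int)) (k : String),
      PySem.Dict.get? (PySem.Dict.mk (l.map (fun e => (e.1, f e.2)))) k
        = (PySem.Dict.get? (PySem.Dict.mk l) k).map f := by
  intro l
  induction l with
  | nil => intro k; rfl
  | cons e rest ih =>
    obtain ⟨k1, v1⟩ := e
    intro k
    simp only [List.map_cons, PySem.Dict.get?_mk_cons]
    by_cases h : (k1 == k) = true
    · rw [if_pos h, if_pos h]; rfl
    · rw [if_neg h, if_neg h]; exact ih k

-- two-pointer merge of strictly increasing lists = membership filter
lemma mergeInter_eq_filter :
    ∀ (p q : List Int), p.Pairwise (· < ·) → q.Pairwise (· < ·) →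
      mergeInter p q = p.filter (fun a => decide (a ∈ q)) := by
  intro p q hp hq
  induction p, q using mergeInter.induct with
  | case1 q => simp [mergeInter]
  | case2 a as_ => simp [mergeInter]
  | case3 as_ b bs ih =>
    have hlt := (List.pairwise_cons.mp hp).1
    rw [mergeInter, if_pos rfl, ih (List.pairwise_cons.mp hp).2 (List.pairwise_cons.mp hq).2]
    simp only [List.filter_cons]
    rw [if_pos (by simp)]
    congr 1
    apply List.filter_congr
    intro x hx
    have hbx : b < x := hlt x hx
    rw [decide_eq_decide]
    simp only [List.mem_cons]
    constructor
    · exact Or.inr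
    · rintro (h | h)
      · omega
      · exact h
  | case4 a as_ b bs hne hab ih =>
    have hbq := (List.pairwise_cons.mp hq).1
    have hna : a ∉ b :: bs := by
      rintro (_ | ⟨_, h⟩)
      · exact hne rfl
      · have := hbq a h; omega
    rw [mergeInter, if_neg hne, if_pos hab, ih (List.pairwise_cons.mp hp).2 hq]
    simp only [List.filter_cons]
    rw [if_neg (by simpa using hna)]
  | case5 a as_ b bs hne hnab ih =>
    have hlt := (List.pairwise_cons.mp hp).1
    have hab : b < a := by omega
    rw [mergeInter, if_neg hne, if_neg hnab, ih hp (List.pairwise_cons.mp hq).2]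
    apply List.filter_congr
    intro x hx
    have hbx : b < x := by
      rcases List.mem_cons.mp hx with h | h
      · omega
      · have := hlt x h; omega
    rw [decide_eq_decide]
    simp only [List.mem_cons]
    constructor
    · exact Or.inr
    · rintro (h | h)
      · omega
      · exact h

lemma posOf_pairwise (l : List Int) : (posOf l).Pairwise (· < ·) :=
  (PySem.List.pairwise_lt_pyRange_one 0 (PySem.List.len l)).sublist List.filter_sublist

-- the two cores agree on ANY two rating lists
lemma core_eq (l1 l2 : List Int) :
    (PySem.List.pyRange 0 (PySem.List.len l1)).foldl
      (fun acc x1 =>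
        if 0 < PySem.List.pyGetD l1 x1 0 ∧ 0 < PySem.List.pyGetD l2 x1 0 then acc ++ [x1] else acc)
      []
    = mergeInter (posOf l1) (posOf l2) := by
  rw [mergeInter_eq_filter _ _ (posOf_pairwise l1) (posOf_pairwise l2)]
  have hfoldl := PySem.List.foldl_append_if
      (fun x1 => decide (0 < PySem.List.pyGetD l1 x1 0 ∧ 0 < PySem.List.pyGetD l2 x1 0))
      (fun x => x) (PySem.List.pyRange 0 (PySem.List.len l1)) []
  simp only [decide_eq_true_eq, List.map_id_fun', id, List.nil_append] at hfoldl
  rw [hfoldl,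
      show posOf l1 = (PySem.List.pyRange 0 (PySem.List.len l1)).filter
        (fun i => decide (0 < PySem.List.pyGetD l1 i 0)) from rfl,
      List.filter_filter]
  apply List.filter_congr
  intro i hi
  have h0i : 0 ≤ i := (PySem.List.mem_pyRange_one.mp hi).1
  by_cases h2 : 0 < PySem.List.pyGetD l2 i 0
  · have hlt : i < (l2.length : Int) := by
      by_contra hge
      rw [pyGetD_of_le_length h0i (by omega)] at h2
      omega
    have hmem : i ∈ posOf l2 := by
      unfold posOf
      refine List.mem_filter.mpr ⟨?_, decide_eq_true h2⟩
      exact PySem.List.mem_pyRange_one.mpr ⟨h0i, by simpa [PySem.List.len] using hlt⟩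
    have hdm : decide (i ∈ posOf l2) = true := decide_eq_true hmem
    simp [h2, hdm]
  · have hnmem : i ∉ posOf l2 := fun hmem =>
      h2 (of_decide_eq_true (List.mem_filter.mp hmem).2)
    have hdm : decide (i ∈ posOf l2) = false := decide_eq_false hnmem
    simp [h2, hdm]

-- ===== VERDICT (by name: the statement is the Claim_ definition above) =====
theorem find_corated_items_spec : Claim_equal_find_corated_items := by
  intro array1 array2 _ _
  unfold Spec_find_corated_items find_corated_items find_corated_items_alt
  have hd : ∀ k : String,
      (PySem.Dict.get? positiveIndicesDict k).getD []
        = posOf ((PySem.Dict.get? allUsersDict k).getD []) := by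
    intro k
    unfold positiveIndicesDict allUsersDict
    rw [posEntries_eq, get?_mk_map posOf allUsersEntries k]
    cases PySem.Dict.get? (PySem.Dict.mk allUsersEntries) k with
    | none => rfl
    | some v => rfl
  rw [hd, hd]
  exact core_eq _ _
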